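-- pv_equiv track=rewrite | github.com/shohei-kojima/Filo_Paramyxo_2023 | scripts/Paramyxo_tr.py | detect_N_orf
-- ===== SOURCE A (Python) =====
-- leader_length = 55
--
-- min_orf_size = 450  # when 3000, 1000 aa
--
-- term_codons = {'TAG', 'TGA', 'TAA'}
--
-- def complement(seq):
--     return seq.translate(str.maketrans('ATGCatgc', 'TACGtacg'))[::-1]
--
-- def detect_N_orf(cseq):
--     seq=complement(cseq)
--     orf_pos=[]
--     for frame in [0, 1, 2]:
--         is_orf = False
--         for i in range(frame + leader_length, len(seq), 3):
--             if seq[i:i+3] == 'ATG':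
--                 if is_orf is False:
--                     start = i
--                     is_orf = True
--             elif seq[i:i+3] in term_codons:
--                 if is_orf:
--                     if i - start > min_orf_size:
--                         orf_pos.append((start, i))
--                     is_orf = False
--     if len(orf_pos) >= 1:
--         N_start = 100000000
--         for s,e in orf_pos:
--             if s < N_start:
--                 N_start = s
--         N_start = str(N_start)
--     else:
--         N_start = 'NA'
--     return orf_pos, N_start
-- ===== SOURCE B (Python) =====
-- leader_length = 55
--
-- min_orf_size = 450
--
-- term_codons = {'TAG', 'TGA', 'TAA'}
--
-- INF = 10 ** 8  # effectively +infinity for any realistic sequence coordinate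
--
--
-- def complement(seq):
--     return seq.translate(str.maketrans('ATGCatgc', 'TACGtacg'))[::-1]
--
--
-- def detect_N_orf(cseq):
--     seq = complement(cseq)
--     n = len(seq)
--     orf_pos = []
--     best = INF
--     for frame in range(3):
--         lo = frame + leader_length
--         for stop in (i for i in range(lo, n, 3) if seq[i:i+3] in term_codons):
--             atg = next((j for j in range(lo, stop, 3) if seq[j:j+3] == 'ATG'), None)
--             if atg is not None and stop - atg > min_orf_size:
--                 orf_pos.append((atg, stop))
--                 if atg < best:
--                     best = atg
--             lo = stop + 3
--     N_start = str(best) if orf_pos else 'NA'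
--     return orf_pos, N_start
-- ===== Notes on version B (the rewrite author's own statement) =====
-- stated objective: alternative
-- what changed: Instead of A's single stateful is_orf/start scan per frame followed by a separate minimum pass over orf_pos, B collects each frame's stop-codon grid indices, searches each inter-stop region for its first ATG, and maintains the minimal qualifying start on the fly while appending (atg, stop) pairs.
import Mathlib
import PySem

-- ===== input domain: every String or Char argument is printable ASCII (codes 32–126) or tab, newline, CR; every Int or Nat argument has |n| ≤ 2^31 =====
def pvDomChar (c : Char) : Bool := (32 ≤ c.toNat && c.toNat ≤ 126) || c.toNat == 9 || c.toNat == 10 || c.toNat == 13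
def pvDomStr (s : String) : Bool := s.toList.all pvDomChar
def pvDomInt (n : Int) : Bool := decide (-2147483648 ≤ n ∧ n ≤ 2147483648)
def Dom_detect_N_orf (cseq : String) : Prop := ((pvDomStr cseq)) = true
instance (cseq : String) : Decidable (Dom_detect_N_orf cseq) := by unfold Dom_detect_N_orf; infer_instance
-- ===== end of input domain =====

-- B re-decomposes each reading frame as: collect the stop-codon grid indices, then scan each
-- inter-stop region once for its first ATG, maintaining the minimal start on the fly
-- ("alternative" decomposition; no speed claim).

-- ===== PORT A =====
-- shared helpers (both Pythons define the same module-level complement/term_codons)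
-- complement: str.translate over the 8-letter table (identity elsewhere), then [::-1];
-- exact on all characters. Strings are handled as List Char throughout (PySem convention).
def pvComp1 (c : Char) : Char :=
  if c = 'A' then 'T' else if c = 'T' then 'A' else if c = 'G' then 'C' else if c = 'C' then 'G'
  else if c = 'a' then 't' else if c = 't' then 'a' else if c = 'g' then 'c' else if c = 'c' then 'g'
  else c

def pvComplement (cs : List Char) : List Char := (cs.map pvComp1).reverse

-- seq[i:i+3]
def pvCodon (seq : List Char) (i : Int) : List Char := PySem.List.slice seq (some i) (some (i + 3))

-- membership in the set literal term_codons = {'TAG','TGA','TAA'}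
def pvTerm (c : List Char) : Bool :=
  c = ['T','A','G'] || c = ['T','G','A'] || c = ['T','A','A']

-- A's loop body: state = (orf_pos, is_orf, start)
def pvStepA (seq : List Char) (st : List (Int × Int) × Bool × Int) (i : Int) :
    List (Int × Int) × Bool × Int :=
  match st with
  | (acc, isOrf, start) =>
    let c := pvCodon seq i
    if c = ['A','T','G'] then
      if isOrf = false then (acc, true, i) else (acc, isOrf, start)
    else if pvTerm c then
      if isOrf then ((if i - start > 450 then acc ++ [(start, i)] else acc), false, start)
      else (acc, isOrf, start)
    else (acc, isOrf, start)

def pvFrameA (seq : List Char) (acc : List (Int × Int)) (frame : Int) : List (Int × Int) :=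
  (((PySem.List.pyRange (frame + 55) (seq.length : Int) 3).foldl (pvStepA seq) (acc, false, 0))).1

def detect_N_orf (cseq : String) : (List (Int × Int)) × String :=
  let seq := pvComplement cseq.toList
  let orf_pos := [(0 : Int), 1, 2].foldl (pvFrameA seq) []
  let N_start :=
    if 1 ≤ orf_pos.length then
      PySem.Int.toStr (orf_pos.foldl (fun n p => if p.1 < n then p.1 else n) 100000000)
    else "NA"
  (orf_pos, N_start)

-- ===== PORT B =====
def pvIsATG (seq : List Char) (i : Int) : Bool := pvCodon seq i = ['A','T','G']

-- B's inner loop over the stop indices of one frame; state = (orf_pos, best)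
def pvSegB (seq : List Char) (stops : List Int) (st : List (Int × Int) × Int) (lo : Int) :
    List (Int × Int) × Int :=
  match stops with
  | [] => st
  | stop :: rest =>
    let st' :=
      match (PySem.List.pyRange lo stop 3).find? (pvIsATG seq) with
      | some j =>
        if stop - j > 450 then (st.1 ++ [(j, stop)], if j < st.2 then j else st.2) else st
      | none => st
    pvSegB seq rest st' (stop + 3)

def pvFrameB (seq : List Char) (st : List (Int × Int) × Int) (frame : Int) :
    List (Int × Int) × Int :=
  let lo := frame + 55
  let stops := (PySem.List.pyRange lo (seq.length : Int) 3).filter (fun i => pvTerm (pvCodon seq i))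
  pvSegB seq stops st lo

def detect_N_orf_alt (cseq : String) : (List (Int × Int)) × String :=
  let seq := pvComplement cseq.toList
  let st := [(0 : Int), 1, 2].foldl (pvFrameB seq) ([], 100000000)
  let N_start := if st.1 = [] then "NA" else PySem.Int.toStr st.2
  (st.1, N_start)

-- ===== PRECONDITION & SPEC =====
def Spec_detect_N_orf (cseq : String) (out : (List (Int × Int)) × String) : Prop :=
  out = detect_N_orf_alt cseq
instance (cseq : String) (out : (List (Int × Int)) × String) : Decidable (Spec_detect_N_orf cseq out) := by
  unfold Spec_detect_N_orf; infer_instance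

-- ===== CLAIM (what is proved, stated in full; the proofs are below) =====
def Claim_equal_detect_N_orf : Prop :=
  ∀ (cseq : String), Dom_detect_N_orf cseq → Spec_detect_N_orf cseq (detect_N_orf cseq)

-- ===== LEMMAS AND PROOFS =====

-- proof-only views of B's segment loop: the appended pairs and the running minimum, decoupled
def pvSegAcc (seq : List Char) (stops : List Int) (acc : List (Int × Int)) (lo : Int) :
    List (Int × Int) :=
  match stops with
  | [] => acc
  | stop :: rest =>
    let acc' :=
      match (PySem.List.pyRange lo stop 3).find? (pvIsATG seq) with
      | some j => if stop - j > 450 then acc ++ [(j, stop)] else acc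
      | none => acc
    pvSegAcc seq rest acc' (stop + 3)

def pvSegBest (seq : List Char) (stops : List Int) (b : Int) (lo : Int) : Int :=
  match stops with
  | [] => b
  | stop :: rest =>
    let b' :=
      match (PySem.List.pyRange lo stop 3).find? (pvIsATG seq) with
      | some j => if stop - j > 450 then (if j < b then j else b) else b
      | none => b
    pvSegBest seq rest b' (stop + 3)

lemma pvSegB_split (seq : List Char) (stops : List Int) :
    ∀ (acc : List (Int × Int)) (b lo : Int),
      pvSegB seq stops (acc, b) lo = (pvSegAcc seq stops acc lo, pvSegBest seq stops b lo) := by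
  induction stops with
  | nil => intro acc b lo; rfl
  | cons stop rest ih =>
    intro acc b lo
    show pvSegB seq rest _ (stop + 3) = _
    rcases hf : (PySem.List.pyRange lo stop 3).find? (pvIsATG seq) with _ | j <;>
      simp only [pvSegAcc, pvSegBest, hf] <;>
      [skip; by_cases hgt : stop - j > 450] <;>
      simp [*]

lemma pvSegAcc_append (seq : List Char) (stops : List Int) :
    ∀ (a x : List (Int × Int)) (lo : Int),
      pvSegAcc seq stops (a ++ x) lo = a ++ pvSegAcc seq stops x lo := by
  induction stops with
  | nil => intro a x lo; rfl
  | cons stop rest ih =>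
    intro a x lo
    show pvSegAcc seq rest _ (stop + 3) = a ++ pvSegAcc seq rest _ (stop + 3)
    rcases hf : (PySem.List.pyRange lo stop 3).find? (pvIsATG seq) with _ | j <;>
      [skip; by_cases hgt : stop - j > 450] <;>
      simp [*, List.append_assoc]

lemma pvSegBest_eq (seq : List Char) (stops : List Int) :
    ∀ (b lo : Int),
      pvSegBest seq stops b lo
        = ((pvSegAcc seq stops [] lo).map Prod.fst).foldl (fun m j => if j < m then j else m) b := by
  induction stops with
  | nil => intro b lo; rfl
  | cons stop rest ih =>
    intro b lo
    rcases hf : (PySem.List.pyRange lo stop 3).find? (pvIsATG seq) with _ | j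
    · simp only [pvSegBest, pvSegAcc, hf]
      exact ih _ _
    · by_cases hgt : stop - j > 450
      · simp only [pvSegBest, pvSegAcc, hf, if_pos hgt, List.nil_append]
        have h := pvSegAcc_append seq rest [(j, stop)] [] (stop + 3)
        simp only [List.append_nil] at h
        rw [h, ih]
        simp
      · simp only [pvSegBest, pvSegAcc, hf, if_neg hgt]
        exact ih _ _

-- step-3 range: induction forms
lemma pvRange3_nil (a b : Int) (h : b ≤ a) : PySem.List.pyRange a b 3 = [] := by
  rw [PySem.List.pyRange_of_pos a b (by norm_num)]
  simp [not_lt.mpr h]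

lemma pvRange3_cons (a b : Int) (h : a < b) :
    PySem.List.pyRange a b 3 = a :: PySem.List.pyRange (a + 3) b 3 := by
  rw [PySem.List.pyRange_of_pos a b (by norm_num),
      PySem.List.pyRange_of_pos (a + 3) b (by norm_num), if_pos h]
  by_cases h3 : a + 3 < b
  · rw [if_pos h3]
    have hn : ((b - a + 3 - 1) / 3).toNat = ((b - (a + 3) + 3 - 1) / 3).toNat + 1 := by omega
    rw [hn, List.range_succ_eq_map, List.map_cons, List.map_map]
    refine congrArg₂ _ (by push_cast; ring) ?_
    exact List.map_congr_left (fun k _ => by simp only [Function.comp_apply]; push_cast; ring)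
  · rw [if_neg h3]
    have hn : ((b - a + 3 - 1) / 3).toNat = 1 := by omega
    rw [hn]
    simp

lemma pvMem3_lt {a b x : Int} (hx : x ∈ PySem.List.pyRange a b 3) : a ≤ x ∧ x < b := by
  have := (PySem.List.mem_pyRange_iff_of_pos (a := a) (b := b) (s := 3) (by norm_num) x).1 hx
  exact ⟨this.1, this.2.1⟩

-- step equations for A's loop body
lemma pvStepA_atg (seq : List Char) (acc : List (Int × Int)) (b : Bool) (s i : Int)
    (h : pvCodon seq i = ['A','T','G']) :
    pvStepA seq (acc, b, s) i = if b then (acc, b, s) else (acc, true, i) := by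
  cases b <;> simp [pvStepA, h]

lemma pvStepA_term (seq : List Char) (acc : List (Int × Int)) (b : Bool) (s i : Int)
    (hn : ¬ pvCodon seq i = ['A','T','G']) (h : pvTerm (pvCodon seq i) = true) :
    pvStepA seq (acc, b, s) i =
      if b then ((if i - s > 450 then acc ++ [(s, i)] else acc), false, s) else (acc, b, s) := by
  cases b <;> simp [pvStepA, hn, h]

lemma pvStepA_other (seq : List Char) (acc : List (Int × Int)) (b : Bool) (s i : Int)
    (hn : ¬ pvCodon seq i = ['A','T','G']) (h : pvTerm (pvCodon seq i) = false) :
    pvStepA seq (acc, b, s) i = (acc, b, s) := by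
  cases b <;> simp [pvStepA, hn, h]

-- "is_orf with first ATG at s" view of B's segment loop
def pvSegBsome (seq : List Char) (stops : List Int) (acc : List (Int × Int)) (s : Int) :
    List (Int × Int) :=
  match stops with
  | [] => acc
  | stop :: rest => pvSegAcc seq rest (if stop - s > 450 then acc ++ [(s, stop)] else acc) (stop + 3)

lemma pvSegAcc_eq_some (seq : List Char) (stops : List Int) (acc : List (Int × Int)) (lo : Int)
    (hA : pvIsATG seq lo = true) (hgt : ∀ x ∈ stops, lo < x) :
    pvSegAcc seq stops acc lo = pvSegBsome seq stops acc lo := by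
  cases stops with
  | nil => rfl
  | cons stop rest =>
    have hlt : lo < stop := hgt stop (by simp)
    simp only [pvSegAcc, pvSegBsome, pvRange3_cons lo stop hlt, List.find?_cons_of_pos hA]

lemma pvSegAcc_shift (seq : List Char) (stops : List Int) (acc : List (Int × Int)) (lo : Int)
    (hA : pvIsATG seq lo = false) (hgt : ∀ x ∈ stops, lo < x) :
    pvSegAcc seq stops acc lo = pvSegAcc seq stops acc (lo + 3) := by
  cases stops with
  | nil => rfl
  | cons stop rest =>
    have hlt : lo < stop := hgt stop (by simp)
    have hf : (PySem.List.pyRange lo stop 3).find? (pvIsATG seq)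
        = (PySem.List.pyRange (lo + 3) stop 3).find? (pvIsATG seq) := by
      rw [pvRange3_cons lo stop hlt, List.find?_cons_of_neg]
      simp [hA]
    simp only [pvSegAcc, hf]

-- main per-frame invariant: A's scan over the remaining grid equals B's segment processing
lemma pvMain (seq : List Char) (b : Int) :
    ∀ (k : Nat) (lo : Int), (b - lo).toNat ≤ k →
      (∀ (acc : List (Int × Int)) (s0 : Int),
        (((PySem.List.pyRange lo b 3).foldl (pvStepA seq) (acc, false, s0))).1
          = pvSegAcc seq ((PySem.List.pyRange lo b 3).filter (fun i => pvTerm (pvCodon seq i))) acc lo)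
      ∧ (∀ (acc : List (Int × Int)) (s : Int),
        (((PySem.List.pyRange lo b 3).foldl (pvStepA seq) (acc, true, s))).1
          = pvSegBsome seq ((PySem.List.pyRange lo b 3).filter (fun i => pvTerm (pvCodon seq i))) acc s) := by
  intro k
  induction k with
  | zero =>
    intro lo hk
    have hnil : PySem.List.pyRange lo b 3 = [] := pvRange3_nil lo b (by omega)
    simp [hnil, pvSegAcc, pvSegBsome]
  | succ k ih =>
    intro lo hk
    by_cases hlt : lo < b
    · have hcons := pvRange3_cons lo b hlt
      have htail := ih (lo + 3) (by omega)
      have hmem : ∀ x ∈ (PySem.List.pyRange (lo + 3) b 3).filter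
          (fun i => pvTerm (pvCodon seq i)), lo < x := by
        intro x hx
        have := pvMem3_lt (List.mem_of_mem_filter hx)
        omega
      constructor
      · intro acc s0
        rw [hcons, List.foldl_cons, List.filter_cons]
        by_cases hatg : pvCodon seq lo = ['A','T','G']
        · have hterm : pvTerm (pvCodon seq lo) = false := by rw [hatg]; decide
          rw [pvStepA_atg seq acc false s0 lo hatg]
          simp only [hterm, Bool.false_eq_true, if_false]
          rw [(htail).2 acc lo]
          exact (pvSegAcc_eq_some seq _ acc lo (by simp [pvIsATG, hatg]) hmem).symm
        · by_cases hterm : pvTerm (pvCodon seq lo) = true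
          · rw [pvStepA_term seq acc false s0 lo hatg hterm]
            simp only [Bool.false_eq_true, if_false, hterm, if_true]
            rw [(htail).1 acc s0]
            have hstep : ∀ T' : List Int, pvSegAcc seq (lo :: T') acc lo = pvSegAcc seq T' acc (lo + 3) := by
              intro T'
              show pvSegAcc seq T'
                  (match (PySem.List.pyRange lo lo 3).find? (pvIsATG seq) with
                   | some j => if lo - j > 450 then acc ++ [(j, lo)] else acc
                   | none => acc) (lo + 3) = pvSegAcc seq T' acc (lo + 3)
              rw [pvRange3_nil lo lo le_rfl]
              rfl
            rw [hstep]
          · rw [pvStepA_other seq acc false s0 lo hatg (by simpa using hterm)]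
            rw [(htail).1 acc s0, eq_comm, if_neg hterm]
            exact pvSegAcc_shift seq _ acc lo (by simp [pvIsATG, hatg]) hmem
      · intro acc s
        rw [hcons, List.foldl_cons, List.filter_cons]
        by_cases hatg : pvCodon seq lo = ['A','T','G']
        · have hterm : pvTerm (pvCodon seq lo) = false := by rw [hatg]; decide
          rw [pvStepA_atg seq acc true s lo hatg]
          simp only [if_true, hterm, Bool.false_eq_true, if_false]
          exact (htail).2 acc s
        · by_cases hterm : pvTerm (pvCodon seq lo) = true
          · rw [pvStepA_term seq acc true s lo hatg hterm]
            simp only [if_true, hterm]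
            rw [(htail).1 _ s]
            rfl
          · rw [pvStepA_other seq acc true s lo hatg (by simpa using hterm)]
            simp only [hterm, Bool.false_eq_true, if_false]
            exact (htail).2 acc s
    · have hnil : PySem.List.pyRange lo b 3 = [] := pvRange3_nil lo b (by omega)
      simp [hnil, pvSegAcc, pvSegBsome]

-- the per-frame accumulator view of B, and its agreement with A's frame scan
def pvFrameAcc (seq : List Char) (acc : List (Int × Int)) (frame : Int) : List (Int × Int) :=
  pvSegAcc seq
    ((PySem.List.pyRange (frame + 55) (seq.length : Int) 3).filter (fun i => pvTerm (pvCodon seq i)))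
    acc (frame + 55)

lemma pvFrame_eq (seq : List Char) (acc : List (Int × Int)) (f : Int) :
    pvFrameA seq acc f = pvFrameAcc seq acc f := by
  unfold pvFrameA pvFrameAcc
  exact (pvMain seq (seq.length : Int) ((seq.length : Int) - (f + 55)).toNat (f + 55) le_rfl).1 acc 0

lemma pvFrameAcc_append (seq : List Char) (acc : List (Int × Int)) (f : Int) :
    pvFrameAcc seq acc f = acc ++ pvFrameAcc seq [] f := by
  unfold pvFrameAcc
  rw [← pvSegAcc_append seq _ acc [] (f + 55), List.append_nil]

lemma pvFrameB_step (seq : List Char) (acc : List (Int × Int)) (b f : Int) :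
    pvFrameB seq (acc, b) f
      = (pvFrameAcc seq acc f,
         ((pvFrameAcc seq [] f).map Prod.fst).foldl (fun m j => if j < m then j else m) b) := by
  unfold pvFrameB pvFrameAcc
  rw [pvSegB_split, pvSegBest_eq]

-- ===== VERDICT (by name: the statement is the Claim_ definition above) =====
theorem detect_N_orf_spec : Claim_equal_detect_N_orf := by
  intro cseq _
  unfold Spec_detect_N_orf
  simp only [detect_N_orf, detect_N_orf_alt]
  set seq := pvComplement cseq.toList with hseq
  have horf : [(0 : Int), 1, 2].foldl (pvFrameA seq) []
      = pvFrameAcc seq [] 0 ++ (pvFrameAcc seq [] 1 ++ pvFrameAcc seq [] 2) := by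
    simp only [List.foldl_cons, List.foldl_nil, pvFrame_eq]
    rw [pvFrameAcc_append seq (pvFrameAcc seq (pvFrameAcc seq [] 0) 1) 2,
        pvFrameAcc_append seq (pvFrameAcc seq [] 0) 1, List.append_assoc]
  have hst : [(0 : Int), 1, 2].foldl (pvFrameB seq) ([], 100000000)
      = (pvFrameAcc seq [] 0 ++ (pvFrameAcc seq [] 1 ++ pvFrameAcc seq [] 2),
         ((pvFrameAcc seq [] 0 ++ (pvFrameAcc seq [] 1 ++ pvFrameAcc seq [] 2)).map Prod.fst).foldl
           (fun m j => if j < m then j else m) 100000000) := by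
    simp only [List.foldl_cons, List.foldl_nil, pvFrameB_step]
    rw [pvFrameAcc_append seq (pvFrameAcc seq (pvFrameAcc seq [] 0) 1) 2,
        pvFrameAcc_append seq (pvFrameAcc seq [] 0) 1, List.append_assoc,
        List.map_append, List.map_append, List.foldl_append, List.foldl_append]
  rw [horf, hst]
  generalize pvFrameAcc seq [] 0 ++ (pvFrameAcc seq [] 1 ++ pvFrameAcc seq [] 2) = L
  have hfold : (L.map Prod.fst).foldl (fun m j => if j < m then j else m) 100000000
      = L.foldl (fun n p => if p.1 < n then p.1 else n) 100000000 := by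
    rw [List.foldl_map]
  rcases L with _ | ⟨p, t⟩
  · simp
  · simp only [List.length_cons]
    rw [if_pos (by omega), if_neg (by simp), hfold]
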